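-- pv_equiv track=rewrite | github.com/perlm/philosophy-passages | scripts/preprocess_texts.py | split_into_passages
-- ===== SOURCE A (Python) =====
-- def split_into_passages(text_lines):
--     passages = []
--     buffer = []
--     for line in text_lines:
--         if line == "":
--             if buffer:
--                 passages.append(" ".join(buffer).strip())
--                 buffer = []
--         else:
--             buffer.append(line)
--     if buffer:
--         passages.append(" ".join(buffer).strip())
--     return passages
-- ===== SOURCE B (Python) =====
-- from itertools import groupby
--
--
-- def split_into_passages(text_lines):
--     return [" ".join(group).strip()
--             for is_blank, group in groupby(text_lines, key=lambda line: line == "")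
--             if not is_blank]
-- ===== Notes on version B (the rewrite author's own statement) =====
-- stated objective: idiomatic
-- what changed: Replaced the manual buffer/flush state machine (with its post-loop tail flush) by an itertools.groupby pass that splits the lines into maximal blank/non-blank runs and join-strips each non-blank run.
import Mathlib
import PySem

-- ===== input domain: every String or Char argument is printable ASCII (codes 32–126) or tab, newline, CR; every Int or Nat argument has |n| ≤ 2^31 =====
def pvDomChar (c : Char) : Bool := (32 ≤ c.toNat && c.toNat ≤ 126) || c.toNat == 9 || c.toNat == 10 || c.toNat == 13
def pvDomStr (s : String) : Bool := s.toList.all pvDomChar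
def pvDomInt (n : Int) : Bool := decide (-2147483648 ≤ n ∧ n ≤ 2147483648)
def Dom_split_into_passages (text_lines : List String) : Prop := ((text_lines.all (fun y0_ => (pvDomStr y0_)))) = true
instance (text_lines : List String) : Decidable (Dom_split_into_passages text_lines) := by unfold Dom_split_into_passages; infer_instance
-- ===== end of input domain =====

-- ===== PORT A =====
-- B replaces A's buffer/flush state machine by a groupby-style maximal-run pass (idiomatic; same cost).
-- Literal port of A: foldl over lines with state (passages, buffer), plus the post-loop flush.
def split_into_passages (text_lines : List String) : List String :=
  let st := text_lines.foldl (fun (st : List String × List String) line =>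
    if line == "" then
      if st.2 ≠ [] then (st.1 ++ [PySem.Str.strip (PySem.Str.join " " st.2)], []) else st
    else (st.1, st.2 ++ [line])) ([], [])
  if st.2 ≠ [] then st.1 ++ [PySem.Str.strip (PySem.Str.join " " st.2)] else st.1

-- ===== PORT B =====
-- Port of B's itertools.groupby pass: each maximal non-blank run is join-stripped, blank runs are skipped.
def split_into_passages_alt (text_lines : List String) : List String :=
  match text_lines with
  | [] => []
  | l :: ls =>
    if l == "" then split_into_passages_alt ls
    else
      PySem.Str.strip (PySem.Str.join " " (l :: ls.takeWhile (fun x => x ≠ ""))) ::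
        split_into_passages_alt (ls.dropWhile (fun x => x ≠ ""))
termination_by text_lines.length
decreasing_by
  · simp
  · simpa using Nat.lt_succ_of_le (ls.length_dropWhile_le _)

-- ===== PRECONDITION & SPEC =====
def Spec_split_into_passages (text_lines : List String) (out : List String) : Prop := out = split_into_passages_alt text_lines
instance (text_lines : List String) (out : List String) : Decidable (Spec_split_into_passages text_lines out) := by unfold Spec_split_into_passages; infer_instance

-- ===== CLAIM (what is proved, stated in full; the proofs are below) =====
def Claim_equal_split_into_passages : Prop := ∀ (text_lines : List String), Dom_split_into_passages text_lines → Spec_split_into_passages text_lines (split_into_passages text_lines)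

-- ===== LEMMAS AND PROOFS =====

-- flush of A's fold state
def pvFlush (st : List String × List String) : List String :=
  if st.2 ≠ [] then st.1 ++ [PySem.Str.strip (PySem.Str.join " " st.2)] else st.1

def pvStep (st : List String × List String) (line : String) : List String × List String :=
  if line == "" then
    if st.2 ≠ [] then (st.1 ++ [PySem.Str.strip (PySem.Str.join " " st.2)], []) else st
  else (st.1, st.2 ++ [line])

theorem pv_main (ls : List String) : ∀ (acc buf : List String),
    pvFlush (ls.foldl pvStep (acc, buf)) =
      acc ++ (if buf = [] then split_into_passages_alt ls
        else PySem.Str.strip (PySem.Str.join " " (buf ++ ls.takeWhile (fun x => x ≠ ""))) ::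
          split_into_passages_alt (ls.dropWhile (fun x => x ≠ ""))) := by
  induction ls with
  | nil =>
    intro acc buf
    by_cases h : buf = [] <;> simp [pvFlush, split_into_passages_alt, h]
  | cons l ls ih =>
    intro acc buf
    by_cases hl : l = ""
    · subst hl
      by_cases h : buf = []
      · subst h
        simp [List.foldl_cons, pvStep, ih, split_into_passages_alt]
      · simp only [List.foldl_cons, pvStep , if_pos h, ih]
        simp [split_into_passages_alt, h, List.takeWhile, List.dropWhile]
    · have hstep : pvStep (acc, buf) l = (acc, buf ++ [l]) := by
        simp [pvStep, hl]
      by_cases h : buf = []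
      · subst h
        simp [List.foldl_cons, hstep, ih, split_into_passages_alt, hl]
      · simp [List.foldl_cons, hstep, ih, h, hl]

-- ===== VERDICT (by name: the statement is the Claim_ definition above) =====
theorem split_into_passages_spec : Claim_equal_split_into_passages := by
  intro text_lines _
  show split_into_passages text_lines = split_into_passages_alt text_lines
  have hfun : (fun (st : List String × List String) line =>
      if line == "" then
        if st.2 ≠ [] then (st.1 ++ [PySem.Str.strip (PySem.Str.join " " st.2)], []) else st
      else (st.1, st.2 ++ [line])) = pvStep := by
    funext st line; simp [pvStep]
  simp only [split_into_passages, hfun]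
  have h := pv_main text_lines [] []
  simpa [pvFlush] using h
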